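-- pv_equiv track=rewrite | github.com/ac031203/Projects | Rabin-Karp.py | f_find2
-- ===== SOURCE A (Python) =====
-- def f_find2(s, l, q, ind):
--     f = 0
--     temp = 1
--     for i in range(l):
--         if l - i - 1 == ind:
--             temp *= 26 % q
--             temp %= q
--         else:
--             f += (temp * ((ord(s[l - i - 1]) - 65) % q)) % q
--             f %= q
--             temp *= 26 % q
--             temp %= q
--     return f % q
-- ===== SOURCE B (Python) =====
-- def f_find2(s, l, q, ind):
--     f = 0
--     for p in range(l):
--         if p == ind:
--             f = (f * 26) % q
--         else:
--             f = (f * 26 + (ord(s[p]) - 65)) % q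
--     return f % q
-- ===== Notes on version B (the rewrite author's own statement) =====
-- stated objective: simpler
-- what changed: Replaces A's backward traversal with an explicit power accumulator (two state variables f and temp, position l-i-1) by a single forward Horner pass (one accumulator, f = (f*26 + coeff) % q).
import Mathlib
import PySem

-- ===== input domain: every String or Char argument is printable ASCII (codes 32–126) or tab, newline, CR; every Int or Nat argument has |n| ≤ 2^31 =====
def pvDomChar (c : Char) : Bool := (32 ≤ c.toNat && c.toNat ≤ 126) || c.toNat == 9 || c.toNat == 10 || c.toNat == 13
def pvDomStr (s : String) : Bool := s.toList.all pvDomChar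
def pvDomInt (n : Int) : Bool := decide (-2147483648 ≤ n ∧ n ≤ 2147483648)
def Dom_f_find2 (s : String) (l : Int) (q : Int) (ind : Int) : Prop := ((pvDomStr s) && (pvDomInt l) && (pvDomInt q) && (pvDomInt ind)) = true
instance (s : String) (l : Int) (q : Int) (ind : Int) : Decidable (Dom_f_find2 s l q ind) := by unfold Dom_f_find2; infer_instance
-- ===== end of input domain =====

-- B replaces A's backward pass with an explicit power accumulator by a single forward Horner accumulator (simpler: one state variable instead of two).

-- shared helper: ord(s[p]) — the integer code of s[p]; the default 65 is never
-- reached under Pre_ (Python raises IndexError exactly there)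
def pvOrdAt (s : String) (p : Int) : Int :=
  match PySem.Str.pyGet? s p with
  | some c => (c.toNat : Int)
  | none => 65

-- ===== PORT A =====
def f_find2 (s : String) (l : Int) (q : Int) (ind : Int) : Int :=
  PySem.Int.mod ((PySem.List.pyRange 0 l 1).foldl (fun (ft : Int × Int) (i : Int) =>
    if l - i - 1 = ind then
      (ft.1, PySem.Int.mod (ft.2 * PySem.Int.mod 26 q) q)
    else
      (PySem.Int.mod (ft.1 + PySem.Int.mod (ft.2 * PySem.Int.mod (pvOrdAt s (l - i - 1) - 65) q) q) q,
       PySem.Int.mod (ft.2 * PySem.Int.mod 26 q) q)) (0, 1)).1 q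

-- ===== PORT B =====
def f_find2_alt (s : String) (l : Int) (q : Int) (ind : Int) : Int :=
  PySem.Int.mod ((PySem.List.pyRange 0 l 1).foldl (fun (f : Int) (p : Int) =>
    if p = ind then PySem.Int.mod (f * 26) q
    else PySem.Int.mod (f * 26 + (pvOrdAt s p - 65)) q) 0) q

-- ===== PRECONDITION & SPEC =====
-- Pre_ is exactly the set of inputs on which A returns: q ≠ 0 (else ZeroDivisionError)
-- and every accessed position 0 ≤ p < l with p ≠ ind is a valid index of s (else IndexError).
def Pre_f_find2 (s : String) (l : Int) (q : Int) (ind : Int) : Prop :=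
  q ≠ 0 ∧ (l ≤ PySem.Str.len s ∨ (l = PySem.Str.len s + 1 ∧ ind = PySem.Str.len s))
instance (s : String) (l : Int) (q : Int) (ind : Int) : Decidable (Pre_f_find2 s l q ind) := by
  unfold Pre_f_find2; infer_instance
def pvWitness_f_find2 : String × Int × Int × Int := ("HELLO", 5, 101, 2)

def Spec_f_find2 (s : String) (l : Int) (q : Int) (ind : Int) (out : Int) : Prop := out = f_find2_alt s l q ind
instance (s : String) (l : Int) (q : Int) (ind : Int) (out : Int) : Decidable (Spec_f_find2 s l q ind out) := by unfold Spec_f_find2; infer_instance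

-- ===== CLAIM (what is proved, stated in full; the proofs are below) =====
def Claim_equal_f_find2 : Prop := ∀ (s : String) (l : Int) (q : Int) (ind : Int), Dom_f_find2 s l q ind → Pre_f_find2 s l q ind → Spec_f_find2 s l q ind (f_find2 s l q ind)

-- ===== LEMMAS AND PROOFS =====

-- the skipped-at-ind coefficient at (integer) position p
def pvC (s : String) (ind p : Int) : Int := if p = ind then 0 else pvOrdAt s p - 65

-- forward Horner reference value
def pvH (s : String) (ind : Int) : Nat → Int
  | 0 => 0
  | n + 1 => 26 * pvH s ind n + pvC s ind (n : Int)

-- A's reference partial sum after n backward steps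
def pvS (s : String) (l ind : Int) (n : Nat) : Int :=
  ∑ j ∈ Finset.range n, 26 ^ j * pvC s ind (l - 1 - (j : Int))

lemma pymod_sub_dvd (a q : Int) : q ∣ (PySem.Int.mod a q - a) :=
  ⟨-(PySem.Int.floordiv a q), by linear_combination PySem.Int.floordiv_mul_add_mod a q⟩

lemma pymod_congr {q a b : Int} (h : q ∣ (a - b)) : PySem.Int.mod a q = PySem.Int.mod b q := by
  by_cases hq : q = 0
  · subst hq
    rw [zero_dvd_iff, sub_eq_zero] at h
    rw [h]
  · have d1 := pymod_sub_dvd a q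
    have d2 := pymod_sub_dvd b q
    have hd : q ∣ (PySem.Int.mod a q - PySem.Int.mod b q) := by
      have : PySem.Int.mod a q - PySem.Int.mod b q
          = (PySem.Int.mod a q - a) + (a - b) - (PySem.Int.mod b q - b) := by ring
      rw [this]; exact dvd_sub (dvd_add d1 h) d2
    obtain ⟨k, hk⟩ := hd
    rcases lt_trichotomy q 0 with hq0 | hq0 | hq0
    · obtain ⟨ha1, ha2⟩ := PySem.Int.mod_neg_bounds a hq0
      obtain ⟨hb1, hb2⟩ := PySem.Int.mod_neg_bounds b hq0
      have hk0 : k = 0 := by nlinarith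
      rw [hk0, mul_zero] at hk
      omega
    · exact absurd hq0 hq
    · have ha1 := PySem.Int.mod_nonneg a hq0
      have ha2 := PySem.Int.mod_lt a hq0
      have hb1 := PySem.Int.mod_nonneg b hq0
      have hb2 := PySem.Int.mod_lt b hq0
      have hk0 : k = 0 := by nlinarith
      rw [hk0, mul_zero] at hk
      omega

lemma dvd_pymod_sub {q a b : Int} (h : q ∣ (a - b)) : q ∣ (PySem.Int.mod a q - b) := by
  have : PySem.Int.mod a q - b = (PySem.Int.mod a q - a) + (a - b) := by ring
  rw [this]; exact dvd_add (pymod_sub_dvd a q) h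

lemma pyRange_zero_toNat (l : Int) :
    PySem.List.pyRange 0 l 1 = (List.range l.toNat).map (fun (k : Nat) => (k : Int)) := by
  rcases le_or_gt 0 l with h | h
  · have hl : l = (l.toNat : Int) := by omega
    conv_lhs => rw [hl]
    exact PySem.List.pyRange_zero_natCast l.toNat
  · have h0 : l.toNat = 0 := by omega
    rw [h0]
    simp [PySem.List.pyRange, not_lt.mpr h.le]

-- fold bodies over Nat indices (after the pyRange rewrite)
def pvBstep (s : String) (q ind : Int) (f : Int) (j : Nat) : Int :=
  PySem.Int.mod (f * 26 + pvC s ind (j : Int)) q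

def pvAstep (s : String) (l q ind : Int) (ft : Int × Int) (j : Nat) : Int × Int :=
  if l - (j : Int) - 1 = ind then
    (ft.1, PySem.Int.mod (ft.2 * PySem.Int.mod 26 q) q)
  else
    (PySem.Int.mod (ft.1 + PySem.Int.mod (ft.2 * PySem.Int.mod (pvOrdAt s (l - (j : Int) - 1) - 65) q) q) q,
     PySem.Int.mod (ft.2 * PySem.Int.mod 26 q) q)

lemma portB_eq (s : String) (l q ind : Int) :
    f_find2_alt s l q ind
      = PySem.Int.mod ((List.range l.toNat).foldl (pvBstep s q ind) 0) q := by
  unfold f_find2_alt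
  rw [pyRange_zero_toNat, List.foldl_map]
  congr 1
  apply PySem.List.foldl_congr_mem
  intro f j _
  unfold pvBstep pvC
  by_cases hp : (j : Int) = ind <;> simp [hp]

lemma portA_eq (s : String) (l q ind : Int) :
    f_find2 s l q ind
      = PySem.Int.mod ((List.range l.toNat).foldl (pvAstep s l q ind) (0, 1)).1 q := by
  unfold f_find2
  rw [pyRange_zero_toNat, List.foldl_map]
  rfl

lemma B_inv (s : String) (q ind : Int) (n : Nat) :
    q ∣ ((List.range n).foldl (pvBstep s q ind) 0 - pvH s ind n) := by
  induction n with
  | zero => simp [pvH]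
  | succ n ih =>
    rw [List.range_succ, List.foldl_append]
    simp only [List.foldl_cons, List.foldl_nil]
    set F := (List.range n).foldl (pvBstep s q ind) 0 with hF
    unfold pvBstep pvH
    apply dvd_pymod_sub
    have : F * 26 + pvC s ind (n : Int) - (26 * pvH s ind n + pvC s ind (n : Int))
        = 26 * (F - pvH s ind n) := by ring
    rw [this]; exact Dvd.dvd.mul_left ih 26

lemma A_inv (s : String) (l q ind : Int) (n : Nat) :
    q ∣ (((List.range n).foldl (pvAstep s l q ind) (0, 1)).1 - pvS s l ind n)
    ∧ q ∣ (((List.range n).foldl (pvAstep s l q ind) (0, 1)).2 - 26 ^ n) := by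
  induction n with
  | zero => simp [pvS]
  | succ n ih =>
    obtain ⟨ihf, iht⟩ := ih
    rw [List.range_succ, List.foldl_append]
    set ft := (List.range n).foldl (pvAstep s l q ind) (0, 1) with hft
    have htemp : q ∣ (PySem.Int.mod (ft.2 * PySem.Int.mod 26 q) q - 26 ^ (n + 1)) := by
      apply dvd_pymod_sub
      have h26 : q ∣ (PySem.Int.mod 26 q - 26) := pymod_sub_dvd 26 q
      have := dvd_mul_sub_mul iht h26
      calc q ∣ ft.2 * PySem.Int.mod 26 q - 26 ^ n * 26 := this
        _ = ft.2 * PySem.Int.mod 26 q - 26 ^ (n + 1) := by ring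
    unfold pvAstep
    simp only [List.foldl_cons, List.foldl_nil]
    rw [pvS, Finset.sum_range_succ, ← pvS]
    split
    case isTrue hp =>
      constructor
      · have hc : pvC s ind (l - 1 - (n : Int)) = 0 := by
          unfold pvC
          rw [if_pos (by omega)]
        rw [hc]
        simpa using ihf
      · exact htemp
    case isFalse hp =>
      constructor
      · apply dvd_pymod_sub
        have hc : pvC s ind (l - 1 - (n : Int)) = pvOrdAt s (l - (n : Int) - 1) - 65 := by
          unfold pvC
          rw [if_neg (by omega)]
          congr 2
          omega
        rw [hc]
        have hm : q ∣ (PySem.Int.mod (ft.2 * PySem.Int.mod (pvOrdAt s (l - (n : Int) - 1) - 65) q) q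
            - 26 ^ n * (pvOrdAt s (l - (n : Int) - 1) - 65)) := by
          apply dvd_pymod_sub
          exact dvd_mul_sub_mul iht (pymod_sub_dvd _ q)
        have : ft.1 + PySem.Int.mod (ft.2 * PySem.Int.mod (pvOrdAt s (l - (n : Int) - 1) - 65) q) q
            - (pvS s l ind n + 26 ^ n * (pvOrdAt s (l - (n : Int) - 1) - 65))
            = (ft.1 - pvS s l ind n)
              + (PySem.Int.mod (ft.2 * PySem.Int.mod (pvOrdAt s (l - (n : Int) - 1) - 65) q) q
                 - 26 ^ n * (pvOrdAt s (l - (n : Int) - 1) - 65)) := by ring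
        rw [this]
        exact dvd_add ihf hm
      · exact htemp

-- Horner value = A's backward power sum (at full length, once ↑n = l)
lemma H_eq_sum (s : String) (ind : Int) (n : Nat) :
    pvH s ind n = ∑ j ∈ Finset.range n, 26 ^ j * pvC s ind ((n : Int) - 1 - (j : Int)) := by
  induction n with
  | zero => simp [pvH]
  | succ n ih =>
    rw [show pvH s ind (n + 1) = 26 * pvH s ind n + pvC s ind (n : Int) from rfl, ih,
        Finset.sum_range_succ', Finset.mul_sum]
    congr 1
    · apply Finset.sum_congr rfl
      intro j _
      have h1 : ((n + 1 : Nat) : Int) - 1 - ((j + 1 : Nat) : Int) = (n : Int) - 1 - (j : Int) := by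
        push_cast; ring
      rw [h1]; ring
    · have h0 : ((n + 1 : Nat) : Int) - 1 - ((0 : Nat) : Int) = (n : Int) := by push_cast; ring
      rw [h0]; ring

-- ===== VERDICT (by name: the statement is the Claim_ definition above) =====
theorem f_find2_spec : Claim_equal_f_find2 := by
  intro s l q ind _ _
  unfold Spec_f_find2
  rw [portA_eq, portB_eq]
  apply pymod_congr
  have hA := (A_inv s l q ind l.toNat).1
  have hB := B_inv s q ind l.toNat
  have hSH : pvS s l ind l.toNat = pvH s ind l.toNat := by
    rcases le_or_gt 0 l with h | h
    · rw [H_eq_sum]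
      unfold pvS
      apply Finset.sum_congr rfl
      intro j _
      have : l - 1 - (j : Int) = ((l.toNat : Int) - 1 - (j : Int)) := by omega
      rw [this]
    · have h0 : l.toNat = 0 := by omega
      rw [h0]; simp [pvS, pvH]
  rw [hSH] at hA
  have : ((List.range l.toNat).foldl (pvAstep s l q ind) (0, 1)).1
      - (List.range l.toNat).foldl (pvBstep s q ind) 0
      = (((List.range l.toNat).foldl (pvAstep s l q ind) (0, 1)).1 - pvH s ind l.toNat)
        - ((List.range l.toNat).foldl (pvBstep s q ind) 0 - pvH s ind l.toNat) := by ring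
  rw [this]
  exact dvd_sub hA hB
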